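-- pv_equiv track=rewrite | github.com/Pranavisriya/zep_bot | app.py | color_for_labels
-- ===== SOURCE A (Python) =====
-- from typing import Any, Dict, List, Optional, Tuple
--
-- def color_for_labels(labels: List[str]) -> str:
--     s = " ".join([str(l).lower() for l in labels]) if labels else ""
--     if "person" in s or "user" in s:
--         return "#79A7FF"
--     if "org" in s or "organization" in s or "company" in s or "institution" in s:
--         return "#7FE0B6"
--     if "location" in s or "place" in s:
--         return "#F49B6A"
--     if "preference" in s or "interest" in s or "skill" in s:
--         return "#B8A5FF"
--     return "#F0C36D"
-- ===== SOURCE B (Python) =====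
-- _KW_PRIORITY = {
--     "person": 0, "user": 0,
--     "org": 1, "organization": 1, "company": 1, "institution": 1,
--     "location": 2, "place": 2,
--     "preference": 3, "interest": 3, "skill": 3,
-- }
-- _COLORS = ["#79A7FF", "#7FE0B6", "#F49B6A", "#B8A5FF", "#F0C36D"]
--
-- def color_for_labels(labels):
--     s = " ".join(str(l).lower() for l in labels)
--     best = min((p for kw, p in _KW_PRIORITY.items() if kw in s), default=4)
--     return _COLORS[best]
-- ===== Notes on version B (the rewrite author's own statement) =====
-- stated objective: alternative
-- what changed: Instead of a short-circuiting chain of category branches, B checks every keyword against the joined string, computes the minimum matched category priority, and indexes a color table with it (first match replaced by exhaustive evaluation plus min).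
import Mathlib
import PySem

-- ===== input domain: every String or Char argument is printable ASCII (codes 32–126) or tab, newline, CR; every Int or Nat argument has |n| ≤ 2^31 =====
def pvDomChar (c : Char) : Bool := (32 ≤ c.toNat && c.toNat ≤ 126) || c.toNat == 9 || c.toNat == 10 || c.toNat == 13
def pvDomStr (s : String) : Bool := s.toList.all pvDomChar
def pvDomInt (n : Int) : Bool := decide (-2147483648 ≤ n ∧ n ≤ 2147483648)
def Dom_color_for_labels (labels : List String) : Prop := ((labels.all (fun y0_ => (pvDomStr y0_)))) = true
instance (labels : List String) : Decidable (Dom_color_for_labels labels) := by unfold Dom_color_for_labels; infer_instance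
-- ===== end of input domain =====

-- B replaces A's short-circuiting branch chain by exhaustive keyword matching: it takes the minimum matched
-- category priority over a keyword→priority table and indexes a color list with it (objective: alternative).

-- ===== PORT A =====
def color_for_labels (labels : List String) : String :=
  let s : String := if labels ≠ [] then PySem.Str.join " " (labels.map (fun l => PySem.Str.lower l)) else ""
  if PySem.Str.isIn "person" s || PySem.Str.isIn "user" s then "#79A7FF"
  else if PySem.Str.isIn "org" s || PySem.Str.isIn "organization" s || PySem.Str.isIn "company" s || PySem.Str.isIn "institution" s then "#7FE0B6"
  else if PySem.Str.isIn "location" s || PySem.Str.isIn "place" s then "#F49B6A"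
  else if PySem.Str.isIn "preference" s || PySem.Str.isIn "interest" s || PySem.Str.isIn "skill" s then "#B8A5FF"
  else "#F0C36D"

-- ===== PORT B =====
def pvKwPriority : List (String × Nat) :=
  [("person", 0), ("user", 0),
   ("org", 1), ("organization", 1), ("company", 1), ("institution", 1),
   ("location", 2), ("place", 2),
   ("preference", 3), ("interest", 3), ("skill", 3)]

def pvColors : List String := ["#79A7FF", "#7FE0B6", "#F49B6A", "#B8A5FF", "#F0C36D"]

-- min over the filtered priorities with default 4, as a fold; the final index is always in range of pvColors
def color_for_labels_alt (labels : List String) : String :=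
  let s : String := PySem.Str.join " " (labels.map (fun l => PySem.Str.lower l))
  let best : Nat := pvKwPriority.foldl (fun acc kp => if PySem.Str.isIn kp.1 s then min acc kp.2 else acc) 4
  pvColors.getD best ""

-- ===== PRECONDITION & SPEC =====
def Spec_color_for_labels (labels : List String) (out : String) : Prop := out = color_for_labels_alt labels
instance (labels : List String) (out : String) : Decidable (Spec_color_for_labels labels out) := by unfold Spec_color_for_labels; infer_instance

-- ===== CLAIM (what is proved, stated in full; the proofs are below) =====
def Claim_equal_color_for_labels : Prop := ∀ (labels : List String), Dom_color_for_labels labels → Spec_color_for_labels labels (color_for_labels labels)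

-- ===== LEMMAS AND PROOFS =====
theorem pvJoin_empty : PySem.Str.join " " ([] : List String) = "" := by decide

-- ===== VERDICT (by name: the statement is the Claim_ definition above) =====
theorem color_for_labels_spec : Claim_equal_color_for_labels := by
  intro labels _
  unfold Spec_color_for_labels color_for_labels color_for_labels_alt
  have hs : (if labels ≠ [] then PySem.Str.join " " (labels.map (fun l => PySem.Str.lower l)) else "")
      = PySem.Str.join " " (labels.map (fun l => PySem.Str.lower l)) := by
    cases labels with
    | nil => simp [pvJoin_empty]
    | cons h t => simp
  rw [hs]
  generalize PySem.Str.join " " (labels.map (fun l => PySem.Str.lower l)) = s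
  simp only [pvKwPriority, pvColors, List.foldl]
  generalize PySem.Str.isIn "person" s = b1
  generalize PySem.Str.isIn "user" s = b2
  generalize PySem.Str.isIn "org" s = b3
  generalize PySem.Str.isIn "organization" s = b4
  generalize PySem.Str.isIn "company" s = b5
  generalize PySem.Str.isIn "institution" s = b6
  generalize PySem.Str.isIn "location" s = b7
  generalize PySem.Str.isIn "place" s = b8
  generalize PySem.Str.isIn "preference" s = b9
  generalize PySem.Str.isIn "interest" s = b10
  generalize PySem.Str.isIn "skill" s = b11
  revert b1 b2 b3 b4 b5 b6 b7 b8 b9 b10 b11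
  decide
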